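-- pv_equiv track=rewrite | github.com/haminthecoder/leetcode_solution | Toptal.py | solution
-- ===== SOURCE A (Python) =====
-- def solution(U, L, C):
--     # write your code in Python 3.6
--     '''
--     sum of upper row = U
--     sum of lower row = L
--     sum of Kth column = C[k]
--     '''
--     rowLen = len(C)
--     width, height = rowLen, 2
--     matrix = [[0 for x in range(width)] for y in range(height)]
--
--     for i in range(rowLen):
--         if C[i] == 0:
--             pass
--         if C[i] == 1:
--             currentFirstRowSum = 0
--             currentSecondRowSum = 0
--             for j in range(rowLen):
--                 currentFirstRowSum += matrix[0][j]
--                 currentSecondRowSum += matrix[1][j]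
--             if currentFirstRowSum < U:
--                 matrix[0][i] = 1
--             if currentFirstRowSum == U and currentSecondRowSum < L:
--                 matrix[1][i] = 1
--             if currentFirstRowSum == U and currentSecondRowSum == L:
--                 return "IMPOSSIBLE"
--         if C[i] == 2:
--             currentFirstRowSum = 0
--             currentSecondRowSum = 0
--             for j in range(rowLen):
--                 currentFirstRowSum += matrix[0][j]
--                 currentSecondRowSum += matrix[1][j]
--             if currentFirstRowSum < U:
--                 matrix[0][i] = 1
--             if currentSecondRowSum < L:
--                 matrix[1][i] = 1
--             if currentFirstRowSum == U and currentSecondRowSum == L: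
--                 return "IMPOSSIBLE"
--
--     finalFirstRowSum = 0
--     finalSecondRowSum = 0
--     for j in range(rowLen):
--         finalFirstRowSum += matrix[0][j]
--         finalSecondRowSum += matrix[1][j]
--     if finalFirstRowSum != U or finalSecondRowSum != L:
--         return "IMPOSSIBLE"
--
--     resultUpper = ""
--     resultLower = ""
--
--     for i in range(rowLen):
--         resultUpper += str(matrix[0][i])
--         resultLower += str(matrix[1][i])
--
--     result = resultUpper + "," + resultLower
--
--     return result
-- ===== SOURCE B (Python) =====
-- def solution(U, L, C):
--     # one pass with running row sums (no re-summing of the matrix each column)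
--     r1 = 0
--     r2 = 0
--     up = ""
--     lo = ""
--     for c in C:
--         t = 0
--         b = 0
--         if c == 1:
--             if r1 < U:
--                 t = 1
--             elif r1 == U:
--                 if r2 < L:
--                     b = 1
--                 elif r2 == L:
--                     return "IMPOSSIBLE"
--         elif c == 2:
--             if r1 == U and r2 == L:
--                 return "IMPOSSIBLE"
--             if r1 < U:
--                 t = 1
--             if r2 < L:
--                 b = 1
--         r1 += t
--         r2 += b
--         up += str(t)
--         lo += str(b)
--     if r1 != U or r2 != L:
--         return "IMPOSSIBLE"
--     return up + "," + lo
-- ===== Notes on version B (the rewrite author's own statement) =====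
-- stated objective: simpler
-- what changed: B makes one pass keeping running row sums and building the output strings incrementally, instead of building a 2xN matrix and re-summing both rows from scratch at every column and again at the end.
import Mathlib
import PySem

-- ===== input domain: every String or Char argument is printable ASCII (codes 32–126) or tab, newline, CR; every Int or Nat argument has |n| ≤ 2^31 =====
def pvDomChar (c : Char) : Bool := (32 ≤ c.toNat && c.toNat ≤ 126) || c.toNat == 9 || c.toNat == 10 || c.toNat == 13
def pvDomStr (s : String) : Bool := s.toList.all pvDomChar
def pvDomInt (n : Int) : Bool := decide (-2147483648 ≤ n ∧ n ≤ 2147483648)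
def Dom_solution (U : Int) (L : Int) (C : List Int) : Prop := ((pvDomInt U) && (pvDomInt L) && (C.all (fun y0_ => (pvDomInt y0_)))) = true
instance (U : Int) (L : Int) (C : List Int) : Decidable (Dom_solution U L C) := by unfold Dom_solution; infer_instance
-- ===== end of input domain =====

-- B replaces A's 2xN matrix and per-column re-summing of both rows by one pass with
-- running row sums, building the answer strings incrementally (objective: simpler).

-- ===== PORT A =====
-- inner 'for j in range(rowLen): s += matrix[r][j]' visits the whole row in order: a foldl over the row
def rowSumA (m : List Int) : Int := m.foldl (fun s x => s + x) 0
-- final 'for i in range(rowLen): result += str(matrix[r][i])' likewise folds over the row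
def rowStrA (m : List Int) : String := m.foldl (fun s x => s ++ PySem.Int.toStr x) ""

-- the main 'for i in range(rowLen)' loop: index i plus the remaining columns C[i:];
-- none = the early 'return "IMPOSSIBLE"'.  ('if C[i]==0: pass' does nothing and is omitted.)
def loopA (U L : Int) : List Int → Nat → List Int → List Int → Option (List Int × List Int)
  | [], _, m0, m1 => some (m0, m1)
  | c :: cs, i, m0, m1 =>
    if c = 1 then
      let s1 := rowSumA m0
      let s2 := rowSumA m1
      let m0' := if s1 < U then m0.set i 1 else m0
      let m1' := if s1 = U ∧ s2 < L then m1.set i 1 else m1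
      if s1 = U ∧ s2 = L then none
      else loopA U L cs (i+1) m0' m1'
    else if c = 2 then
      let s1 := rowSumA m0
      let s2 := rowSumA m1
      let m0' := if s1 < U then m0.set i 1 else m0
      let m1' := if s2 < L then m1.set i 1 else m1
      if s1 = U ∧ s2 = L then none
      else loopA U L cs (i+1) m0' m1'
    else loopA U L cs (i+1) m0 m1

def finishA (U L : Int) (m0 m1 : List Int) : String :=
  if rowSumA m0 ≠ U ∨ rowSumA m1 ≠ L then "IMPOSSIBLE"
  else rowStrA m0 ++ "," ++ rowStrA m1

def solution (U : Int) (L : Int) (C : List Int) : String :=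
  let n := C.length
  match loopA U L C 0 (List.replicate n 0) (List.replicate n 0) with
  | none => "IMPOSSIBLE"
  | some (m0, m1) => finishA U L m0 m1

-- ===== PORT B =====
-- one pass: running sums r1 r2, output strings up lo; 'some (t,b)' = the column bits,
-- 'none' = the early 'return "IMPOSSIBLE"'
def loopB (U L : Int) : List Int → Int → Int → String → String → String
  | [], r1, r2, up, lo =>
    if r1 ≠ U ∨ r2 ≠ L then "IMPOSSIBLE" else up ++ "," ++ lo
  | c :: cs, r1, r2, up, lo =>
    match (if c = 1 then
             if r1 < U then some ((1 : Int), (0 : Int))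
             else if r1 = U then
               if r2 < L then some (0, 1)
               else if r2 = L then none
               else some (0, 0)
             else some (0, 0)
           else if c = 2 then
             if r1 = U ∧ r2 = L then none
             else some ((if r1 < U then 1 else 0), (if r2 < L then 1 else 0))
           else some (0, 0)) with
    | none => "IMPOSSIBLE"
    | some (t, b) =>
        loopB U L cs (r1 + t) (r2 + b) (up ++ PySem.Int.toStr t) (lo ++ PySem.Int.toStr b)

def solution_alt (U : Int) (L : Int) (C : List Int) : String :=
  loopB U L C 0 0 "" ""

-- ===== PRECONDITION & SPEC =====
def Spec_solution (U : Int) (L : Int) (C : List Int) (out : String) : Prop := out = solution_alt U L C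
instance (U : Int) (L : Int) (C : List Int) (out : String) : Decidable (Spec_solution U L C out) := by unfold Spec_solution; infer_instance

-- ===== CLAIM (what is proved, stated in full; the proofs are below) =====
def Claim_equal_solution : Prop := ∀ (U : Int) (L : Int) (C : List Int), Dom_solution U L C → Spec_solution U L C (solution U L C)

-- ===== LEMMAS AND PROOFS =====

theorem rowSumA_shift (m : List Int) (s : Int) :
    m.foldl (fun a x => a + x) s = s + rowSumA m := by
  induction m generalizing s with
  | nil => simp [rowSumA]
  | cons x xs ih => simp [rowSumA, List.foldl, ih (s + x), ih x]; ring

theorem rowSumA_append (p q : List Int) :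
    rowSumA (p ++ q) = rowSumA p + rowSumA q := by
  simp [rowSumA, List.foldl_append]
  rw [rowSumA_shift]
  rfl

theorem rowSumA_replicate_zero (k : Nat) : rowSumA (List.replicate k 0) = 0 := by
  induction k with
  | zero => rfl
  | succ n ih =>
      rw [List.replicate_succ]
      show List.foldl (fun a x => a + x) (0 + 0) (List.replicate n 0) = 0
      rw [rowSumA_shift, ih]
      norm_num

theorem rowStrA_append_one (p : List Int) (v : Int) :
    rowStrA (p ++ [v]) = rowStrA p ++ PySem.Int.toStr v := by
  simp [rowStrA, List.foldl_append, List.foldl]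

-- setting the first cell after the already-chosen prefix
theorem set_at_prefix (p : List Int) (z v : Int) (rest : List Int) :
    (p ++ z :: rest).set p.length v = p ++ v :: rest := by
  induction p with
  | nil => simp
  | cons a as ih => simp [ih]

theorem sum_pref (p : List Int) (k : Nat) :
    rowSumA (p ++ List.replicate k 0) = rowSumA p := by
  simp [rowSumA_append, rowSumA_replicate_zero]

-- the main invariant: A's loop on (chosen prefix ++ zeros) equals B's loop on the running state
theorem loop_eq (U L : Int) (cs : List Int) :
    ∀ (p0 p1 : List Int), p0.length = p1.length →
    (match loopA U L cs p0.length (p0 ++ List.replicate cs.length 0)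
                                   (p1 ++ List.replicate cs.length 0) with
     | none => "IMPOSSIBLE"
     | some (m0, m1) => finishA U L m0 m1)
    = loopB U L cs (rowSumA p0) (rowSumA p1) (rowStrA p0) (rowStrA p1) := by
  induction cs with
  | nil =>
      intro p0 p1 _
      simp [loopA, loopB, finishA]
  | cons c rest ih =>
      intro p0 p1 hlen
      simp only [List.length_cons, List.replicate_succ]
      have step : ∀ (t b : Int),
          (match loopA U L rest (p0.length + 1) ((p0 ++ [t]) ++ List.replicate rest.length 0)
                                                 ((p1 ++ [b]) ++ List.replicate rest.length 0) with
           | none => "IMPOSSIBLE"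
           | some (m0, m1) => finishA U L m0 m1)
          = loopB U L rest (rowSumA p0 + t) (rowSumA p1 + b)
              (rowStrA p0 ++ PySem.Int.toStr t) (rowStrA p1 ++ PySem.Int.toStr b) := by
        intro t b
        have h1 : (p0 ++ [t]).length = (p1 ++ [b]).length := by simp [hlen]
        have h2 := ih (p0 ++ [t]) (p1 ++ [b]) h1
        simpa [rowSumA_append, rowStrA_append_one, rowSumA] using h2
      have hset0 : (p0 ++ 0 :: List.replicate rest.length 0).set p0.length 1
          = (p0 ++ [1]) ++ List.replicate rest.length 0 := by
        rw [set_at_prefix]; simp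
      have hset1 : (p1 ++ 0 :: List.replicate rest.length 0).set p0.length 1
          = (p1 ++ [1]) ++ List.replicate rest.length 0 := by
        rw [hlen, set_at_prefix]; simp
      have hns0 : p0 ++ 0 :: List.replicate rest.length 0
          = (p0 ++ [0]) ++ List.replicate rest.length 0 := by simp
      have hns1 : p1 ++ 0 :: List.replicate rest.length 0
          = (p1 ++ [0]) ++ List.replicate rest.length 0 := by simp
      have hs0 : rowSumA (p0 ++ 0 :: List.replicate rest.length 0) = rowSumA p0 := by
        rw [hns0, sum_pref, rowSumA_append]; simp [rowSumA]
      have hs1 : rowSumA (p1 ++ 0 :: List.replicate rest.length 0) = rowSumA p1 := by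
        rw [hns1, sum_pref, rowSumA_append]; simp [rowSumA]
      by_cases hc1 : c = 1
      · subst hc1
        simp only [loopA, loopB, hs0, hs1, reduceIte]
        split_ifs <;>
          first
            | rfl
            | omega
            | (rw [hset0, hns1]; simpa using step 1 0)
            | (rw [hns0, hset1]; simpa using step 0 1)
            | (rw [hns0, hns1]; simpa using step 0 0)
      · by_cases hc2 : c = 2
        · subst hc2
          simp only [loopA, loopB, hc1, hs0, hs1, reduceIte]
          split_ifs <;>
            first
              | rfl
              | omega
              | (rw [hset0, hset1]; simpa using step 1 1)
              | (rw [hset0, hns1]; simpa using step 1 0)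
              | (rw [hns0, hset1]; simpa using step 0 1)
              | (rw [hns0, hns1]; simpa using step 0 0)
        · simp only [loopA, loopB, if_neg hc1, if_neg hc2]
          rw [hns0, hns1]
          simpa using step 0 0

-- ===== VERDICT (by name: the statement is the Claim_ definition above) =====
theorem solution_spec : Claim_equal_solution := by
  intro U L C _
  unfold Spec_solution solution solution_alt
  have h := loop_eq U L C [] [] rfl
  simpa [rowSumA, rowStrA] using h
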